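-- pv_equiv track=rewrite | github.com/tomofumikitano/adventofcode2020 | day11/day11.py | visible_seats
-- ===== SOURCE A (Python) =====
-- DIRECTIONS = {
--     (-1, -1), (-1, 0), (-1, +1),
--     (0, -1),          (0, +1),
--     (+1, -1), (+1, 0), (+1, +1)
-- }
--
-- def visible_seats(grid, i, j, cache=None):
--     """
--     Returns:
--         list of list of visible seats for 8 directions
--     """
--     if cache is not None and (i, j) in cache:
--         return cache[(i, j)]
--
--     result = []
--     height, width = len(grid), len(grid[0])
--     for v in DIRECTIONS:
--         seats_in_v = []
--         for n in range(1, max(height, width)):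
--             x, y = i + n * v[0], j + n * v[1]
--             if x in range(0, height) and y in range(0, width):
--                 seats_in_v.append((x, y))
--         result.append(seats_in_v)
--
--     if cache is not None:
--         cache[(i, j)] = result
--     return result
-- ===== SOURCE B (Python) =====
-- DIRECTIONS = {
--     (-1, -1), (-1, 0), (-1, +1),
--     (0, -1),          (0, +1),
--     (+1, -1), (+1, 0), (+1, +1)
-- }
--
-- def _clip(lo, hi, pos, d, size):
--     """Narrow the step interval [lo, hi] to the steps n that keep pos + n*d
--     within [0, size) -- slab clipping of a ray against one axis (unit steps,
--     so the slab bounds are plain differences)."""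
--     if d > 0:
--         return max(lo, -pos), min(hi, size - 1 - pos)
--     if d < 0:
--         return max(lo, pos - (size - 1)), min(hi, pos)
--     return (lo, hi) if 0 <= pos < size else (lo, lo - 1)
--
-- def visible_seats(grid, i, j, cache=None):
--     """
--     Returns:
--         list of list of visible seats for 8 directions
--     """
--     if cache is not None and (i, j) in cache:
--         return cache[(i, j)]
--
--     height, width = len(grid), len(grid[0])
--     result = []
--     for dx, dy in DIRECTIONS:
--         # a ray inside the grid never exceeds max(height, width) - 1 steps;
--         # clip that step interval against both slabs, then emit it directly
--         lo, hi = _clip(1, max(height, width) - 1, i, dx, height)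
--         lo, hi = _clip(lo, hi, j, dy, width)
--         result.append([(i + n * dx, j + n * dy) for n in range(lo, hi + 1)])
--
--     if cache is not None:
--         cache[(i, j)] = result
--     return result
-- ===== Notes on version B (the rewrite author's own statement) =====
-- stated objective: simpler
-- what changed: A tests every candidate cell along each ray for being in bounds; B clips the step interval of each ray against the grid's two slabs (standard ray-rectangle slab clipping) and emits the ray as a single range with no per-cell bounds test. Pre_ excludes only the empty grid without a cache hit, on which A raises IndexError.
-- outside the precondition, e.g. on visible_seats([], 0, 0, None): A raises IndexError, B raises IndexError
import Mathlib
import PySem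

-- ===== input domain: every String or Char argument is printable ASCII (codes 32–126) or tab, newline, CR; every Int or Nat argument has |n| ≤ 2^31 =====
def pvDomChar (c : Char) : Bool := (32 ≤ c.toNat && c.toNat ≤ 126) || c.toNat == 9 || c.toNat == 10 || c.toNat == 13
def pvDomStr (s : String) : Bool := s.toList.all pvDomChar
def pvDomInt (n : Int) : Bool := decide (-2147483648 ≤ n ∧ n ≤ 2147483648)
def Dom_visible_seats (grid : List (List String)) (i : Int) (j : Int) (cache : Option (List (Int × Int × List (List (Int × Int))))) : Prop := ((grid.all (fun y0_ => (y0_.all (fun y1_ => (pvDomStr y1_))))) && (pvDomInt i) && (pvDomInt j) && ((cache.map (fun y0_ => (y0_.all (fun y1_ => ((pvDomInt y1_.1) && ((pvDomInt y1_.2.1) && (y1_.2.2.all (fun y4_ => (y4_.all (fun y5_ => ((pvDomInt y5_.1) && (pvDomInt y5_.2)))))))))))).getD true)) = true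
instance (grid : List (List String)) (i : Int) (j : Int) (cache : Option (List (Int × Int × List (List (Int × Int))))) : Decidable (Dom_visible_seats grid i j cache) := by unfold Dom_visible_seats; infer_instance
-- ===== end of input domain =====

-- B replaces A's per-cell bounds test along each ray by slab clipping of the ray's step interval
-- (simpler: one range per direction, no filtering). Both Pythons store the result into `cache` in
-- place when a cache dict is passed and the key is absent; the equivalence proved here is about
-- the RETURN value.

-- CPython's iteration order of the literal set DIRECTIONS (deterministic: tuples of small ints)
def pvDirs : List (Int × Int) := [(0, 1), (-1, -1), (-1, 1), (1, 1), (1, -1), (-1, 0), (1, 0), (0, -1)]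

-- `cache is not None and (i, j) in cache` / `cache[(i, j)]` (first match; dict keys are unique)
def pvCacheGet? (cache : Option (List (Int × Int × List (List (Int × Int))))) (i j : Int) :
    Option (List (List (Int × Int))) :=
  cache.bind (fun c => (c.find? (fun e => e.1 == i && e.2.1 == j)).map (·.2.2))

-- ===== PORT A =====
-- inner loop of A: for n in range(1, max(h,w)): append (x,y) if in bounds
def pvRay (height width i j : Int) (v : Int × Int) : List (Int × Int) :=
  (PySem.List.pyRange 1 (max height width) 1).foldl
    (fun seats n =>
      let x := i + n * v.1
      let y := j + n * v.2
      if 0 ≤ x ∧ x < height ∧ 0 ≤ y ∧ y < width then seats ++ [(x, y)] else seats) []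

def visible_seats (grid : List (List String)) (i : Int) (j : Int) (cache : Option (List (Int × Int × List (List (Int × Int))))) : List (List (Int × Int)) :=
  match pvCacheGet? cache i j with
  | some r => r
  | none =>
    match PySem.List.pyGet? grid 0 with
    | none => []  -- grid[0] raises IndexError here: outside Pre_
    | some row0 =>
      let height : Int := grid.length
      let width : Int := row0.length
      pvDirs.foldl (fun result v => result ++ [pvRay height width i j v]) []

-- ===== PORT B =====
-- Source B's _clip: narrow the step interval [lo, hi] to steps n keeping pos + n*d within [0, size)
def pvClip (lo hi pos d size : Int) : Int × Int :=
  if d > 0 then (max lo (-pos), min hi (size - 1 - pos))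
  else if d < 0 then (max lo (pos - (size - 1)), min hi pos)
  else if 0 ≤ pos ∧ pos < size then (lo, hi) else (lo, lo - 1)

-- one direction: clip the step interval against both slabs, then emit the range directly
def pvRayAlt (height width i j : Int) (v : Int × Int) : List (Int × Int) :=
  let p1 := pvClip 1 (max height width - 1) i v.1 height
  let p2 := pvClip p1.1 p1.2 j v.2 width
  (PySem.List.pyRange p2.1 (p2.2 + 1) 1).map (fun n => (i + n * v.1, j + n * v.2))

def visible_seats_alt (grid : List (List String)) (i : Int) (j : Int) (cache : Option (List (Int × Int × List (List (Int × Int))))) : List (List (Int × Int)) :=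
  match pvCacheGet? cache i j with
  | some r => r
  | none =>
    match PySem.List.pyGet? grid 0 with
    | none => []  -- len(grid[0]) raises IndexError here: outside Pre_
    | some row0 =>
      let height : Int := grid.length
      let width : Int := row0.length
      pvDirs.map (fun v => pvRayAlt height width i j v)

-- ===== PRECONDITION & SPEC =====
-- Pre_ excludes only the inputs on which A raises IndexError: an empty grid with no cache hit
def Pre_visible_seats (grid : List (List String)) (i : Int) (j : Int) (cache : Option (List (Int × Int × List (List (Int × Int))))) : Prop :=
  grid ≠ [] ∨ (pvCacheGet? cache i j).isSome
instance (grid : List (List String)) (i : Int) (j : Int) (cache : Option (List (Int × Int × List (List (Int × Int))))) : Decidable (Pre_visible_seats grid i j cache) := by unfold Pre_visible_seats; infer_instance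

def pvWitness_visible_seats : List (List String) × Int × Int × (Option (List (Int × Int × List (List (Int × Int))))) :=
  ([["L", "."], [".", "L"]], 0, 1, none)

def Spec_visible_seats (grid : List (List String)) (i : Int) (j : Int) (cache : Option (List (Int × Int × List (List (Int × Int))))) (out : List (List (Int × Int))) : Prop := out = visible_seats_alt grid i j cache
instance (grid : List (List String)) (i : Int) (j : Int) (cache : Option (List (Int × Int × List (List (Int × Int))))) (out : List (List (Int × Int))) : Decidable (Spec_visible_seats grid i j cache out) := by unfold Spec_visible_seats; infer_instance

-- ===== CLAIM (what is proved, stated in full; the proofs are below) =====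
def Claim_equal_visible_seats : Prop := ∀ (grid : List (List String)) (i : Int) (j : Int) (cache : Option (List (Int × Int × List (List (Int × Int))))), Dom_visible_seats grid i j cache → Pre_visible_seats grid i j cache → Spec_visible_seats grid i j cache (visible_seats grid i j cache)

-- ===== LEMMAS AND PROOFS =====

-- filtering an integer range by an interval condition yields the intersected range
lemma filter_pyRange_interval (a b lo hi : Int) (p : Int → Bool)
    (hP : ∀ n, ((a ≤ n ∧ n < b) ∧ p n = true) ↔ (lo ≤ n ∧ n ≤ hi)) :
    (PySem.List.pyRange a b 1).filter p = PySem.List.pyRange lo (hi + 1) 1 := by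
  refine List.Perm.eq_of_pairwise (le := (· < ·))
    (fun x y _ _ h1 h2 => absurd h2 (not_lt.2 h1.le))
    (List.Pairwise.filter _ (PySem.List.pairwise_lt_pyRange_one a b))
    (PySem.List.pairwise_lt_pyRange_one lo (hi + 1))
    ((List.perm_ext_iff_of_nodup ((PySem.List.nodup_pyRange_one a b).filter _)
      (PySem.List.nodup_pyRange_one _ _)).2 ?_)
  intro n
  simp only [List.mem_filter, PySem.List.mem_pyRange_one]
  have := hP n
  constructor
  · rintro ⟨⟨h1, h2⟩, hp⟩
    have := this.1 ⟨⟨h1, h2⟩, hp⟩; omega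
  · rintro ⟨h1, h2⟩
    have h := this.2 ⟨h1, by omega⟩
    exact ⟨⟨h.1.1, h.1.2⟩, h.2⟩

-- the two ray computations agree (for each of the eight unit directions)
lemma ray_eq (height width i j : Int) (v : Int × Int)
    (hv : v ∈ pvDirs) (hw : 1 ≤ height) :
    pvRay height width i j v = pvRayAlt height width i j v := by
  obtain ⟨dx, dy⟩ := v
  have hdx : dx = 1 ∨ dx = 0 ∨ dx = -1 := by
    simp [pvDirs, Prod.ext_iff] at hv; omega
  have hdy : dy = 1 ∨ dy = 0 ∨ dy = -1 := by
    simp [pvDirs, Prod.ext_iff] at hv; omega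
  clear hv
  simp only [pvRay, pvRayAlt]
  rw [PySem.List.foldl_append_ite
    (p := fun n => 0 ≤ i + n * dx ∧ i + n * dx < height ∧ 0 ≤ j + n * dy ∧ j + n * dy < width)
    (f := fun n => (i + n * dx, j + n * dy))]
  rw [List.nil_append]
  rcases hdx with h1 | h1 | h1 <;> rcases hdy with h2 | h2 | h2 <;> subst h1 <;> subst h2 <;>
    by_cases hI : 0 ≤ i ∧ i < height <;> by_cases hJ : 0 ≤ j ∧ j < width <;>
    simp only [pvClip, hI, hJ, gt_iff_lt, and_self, if_true,
      if_false, show ¬((1:Int) < 0) by norm_num, show ((0:Int) < 1) by norm_num,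
      show ¬((0:Int) < 0) by norm_num, show ((-1:Int) < 0) by norm_num,
      show ¬((0:Int) < -1) by norm_num] <;>
    exact congrArg (List.map _) (filter_pyRange_interval _ _ _ _ _
      (fun n => by simp only [decide_eq_true_eq]; constructor <;> intro h <;> omega))

-- ===== VERDICT (by name: the statement is the Claim_ definition above) =====
theorem visible_seats_spec : Claim_equal_visible_seats := by
  intro grid i j cache _ hpre
  unfold Spec_visible_seats visible_seats visible_seats_alt
  cases hc : pvCacheGet? cache i j with
  | some r => rfl
  | none =>
    cases grid with
    | nil =>
      rcases hpre with h | h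
      · exact absurd rfl h
      · rw [hc] at h; exact absurd h (by simp)
    | cons row0 rest =>
      have hget : PySem.List.pyGet? (row0 :: rest) 0 = some row0 := by
        simp [PySem.List.pyGet?, PySem.List.pyIdx?]
      rw [hget]
      simp only
      rw [PySem.List.foldl_append_singleton_eq_map, List.nil_append]
      refine List.map_congr_left (fun v hv => ?_)
      have hw : (1 : Int) ≤ ((row0 :: rest).length : Int) := by
        have : ((row0 :: rest).length : Int) = (rest.length : Int) + 1 := by simp
        omega
      exact ray_eq _ _ i j v hv hw
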